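-- pv_equiv track=rewrite | github.com/POSMAF/POS | POSMAF/marocpos/models/product_attribute.py | generate_variant_combinations_dict
-- ===== SOURCE A (Python) =====
-- def generate_variant_combinations_dict(attributes_values):
--     """
--     Generate all possible combinations of attribute values
--
--     Args:
--         attributes_values: A dict where keys are attribute names and values are lists of values
--             e.g. {'Color': ['Red', 'Blue'], 'Size': ['S', 'M', 'L']}
--
--     Returns:
--         A list of dictionaries, each representing a variant combination
--     """
--     def generate_combinations(attrs, current=None, index=0):
--         if current is None:
--             current = {}
--
--         if index >= len(attrs):
--             return [current.copy()]
--
--         attr_name = list(attrs.keys())[index]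
--         combinations = []
--
--         for value in attrs[attr_name]:
--             current[attr_name] = value
--             combinations.extend(generate_combinations(attrs, current, index + 1))
--
--         return combinations
--
--     return generate_combinations(attributes_values)
-- ===== SOURCE B (Python) =====
-- def generate_variant_combinations_dict(attributes_values):
--     """Iterative fold instead of recursion: start from a single empty combination and extend each partial
--     combination with each value of the next attribute."""
--     result = [{}]
--     for name, values in attributes_values.items():
--         result = [{**r, name: v} for r in result for v in values]
--     return result
-- ===== Notes on version B (the rewrite author's own statement) =====
-- stated objective: idiomatic
-- what changed: Replaces the index-driven recursion that mutates a shared dict with an iterative fold: the result list starts with one empty combination and one comprehension per attribute extends every partial combination with each of its values.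
import Mathlib
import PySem

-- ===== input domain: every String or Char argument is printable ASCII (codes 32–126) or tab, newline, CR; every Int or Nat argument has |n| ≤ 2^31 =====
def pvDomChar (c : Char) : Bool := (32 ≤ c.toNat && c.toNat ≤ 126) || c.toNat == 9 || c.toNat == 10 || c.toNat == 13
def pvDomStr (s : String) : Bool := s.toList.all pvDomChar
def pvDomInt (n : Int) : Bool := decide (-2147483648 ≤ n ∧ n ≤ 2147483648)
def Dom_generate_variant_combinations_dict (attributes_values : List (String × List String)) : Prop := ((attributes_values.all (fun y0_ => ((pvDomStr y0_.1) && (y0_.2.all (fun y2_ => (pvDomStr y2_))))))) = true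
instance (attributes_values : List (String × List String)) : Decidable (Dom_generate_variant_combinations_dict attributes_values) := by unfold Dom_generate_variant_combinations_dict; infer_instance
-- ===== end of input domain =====

-- B replaces A's index-driven recursion (which mutates one shared dict) by an iterative fold
-- over the attributes; same return value, no speed claim. The Python parameter is a dict, so the
-- assoc-list argument is read as a PySem.Dict (PySem.Dict.ofList: last value wins, first position).

-- ===== PORT A =====
-- inner helper generate_combinations(attrs, current, index); dicts are PySem.Dict,
-- current[attr_name] = value is Dict.insert (overwrite keeps position), current.copy() is the value itself.
def pvGenCombinations (attrs : PySem.Dict String (List String))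
    (current : PySem.Dict String String) (index : Nat) :
    List (PySem.Dict String String) :=
  if index ≥ attrs.keys.length then [current]
  else
    let attr_name := attrs.keys.getD index ""
    (attrs.getD attr_name []).foldl
      (fun combinations value =>
        combinations ++ pvGenCombinations attrs (current.insert attr_name value) (index + 1))
      []
termination_by attrs.keys.length - index
decreasing_by omega

def generate_variant_combinations_dict (attributes_values : List (String × List String)) : List (List (String × String)) :=
  (pvGenCombinations (PySem.Dict.ofList attributes_values) PySem.Dict.empty 0).map (·.items)

-- ===== PORT B =====
-- B: fold over items(), extending every partial combination with each value ({**r, name: v} = Dict.insert)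
def generate_variant_combinations_dict_alt (attributes_values : List (String × List String)) : List (List (String × String)) :=
  ((PySem.Dict.ofList attributes_values).items.foldl
      (fun result nv => result.flatMap (fun r => nv.2.map (fun v => r.insert nv.1 v)))
      [PySem.Dict.empty]).map (·.items)

-- ===== PRECONDITION & SPEC =====
def Spec_generate_variant_combinations_dict (attributes_values : List (String × List String)) (out : List (List (String × String))) : Prop := out = generate_variant_combinations_dict_alt attributes_values
instance (attributes_values : List (String × List String)) (out : List (List (String × String))) : Decidable (Spec_generate_variant_combinations_dict attributes_values out) := by unfold Spec_generate_variant_combinations_dict; infer_instance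

-- ===== CLAIM (what is proved, stated in full; the proofs are below) =====
def Claim_equal_generate_variant_combinations_dict : Prop := ∀ (attributes_values : List (String × List String)), Dom_generate_variant_combinations_dict attributes_values → Spec_generate_variant_combinations_dict attributes_values (generate_variant_combinations_dict attributes_values)

-- ===== LEMMAS AND PROOFS =====

-- the fold of B, as a function of the starting list of partial combinations
def pvFold (items : List (String × List String)) (l : List (PySem.Dict String String)) :
    List (PySem.Dict String String) :=
  items.foldl (fun result nv => result.flatMap (fun r => nv.2.map (fun v => r.insert nv.1 v))) l

theorem pvFold_nil (items : List (String × List String)) : pvFold items [] = [] := by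
  induction items with
  | nil => rfl
  | cons nv rest ih => simpa [pvFold, List.foldl_cons] using ih

theorem pvFold_append (items : List (String × List String)) (l1 l2 : List (PySem.Dict String String)) :
    pvFold items (l1 ++ l2) = pvFold items l1 ++ pvFold items l2 := by
  induction items generalizing l1 l2 with
  | nil => rfl
  | cons nv rest ih => simp [pvFold, List.foldl_cons, List.flatMap_append] at ih ⊢; exact ih _ _

theorem pvFold_flatMap {α : Type} (items : List (String × List String))
    (xs : List α) (g : α → List (PySem.Dict String String)) :
    pvFold items (xs.flatMap g) = xs.flatMap (fun x => pvFold items (g x)) := by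
  induction xs with
  | nil => exact pvFold_nil items
  | cons x rest ih => simp [List.flatMap_cons, pvFold_append, ih]

theorem pvGen_eq_fold (attrs : PySem.Dict String (List String)) (hnd : attrs.keys.Nodup)
    (current : PySem.Dict String String) (index : Nat) :
    pvGenCombinations attrs current index = pvFold (attrs.items.drop index) [current] := by
  by_cases h : index ≥ attrs.keys.length
  · have hlen : attrs.items.length = attrs.keys.length := by
      simp [PySem.Dict.keys]
    have hnil : attrs.items.drop index = [] := List.drop_eq_nil_of_le (by omega)
    rw [pvGenCombinations, hnil]
    simp [h, pvFold]
  · have hlt : index < attrs.keys.length := by omega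
    have hlen : index < attrs.items.length := by
      simpa [PySem.Dict.keys] using hlt
    have hdrop : attrs.items.drop index = attrs.items[index] :: attrs.items.drop (index + 1) :=
      List.drop_eq_getElem_cons hlen
    have hkey : attrs.keys.getD index "" = (attrs.items[index]).1 := by
      simp [PySem.Dict.keys, List.getD_eq_getElem?_getD, hlen]
    have hmem : attrs.items[index] ∈ attrs.items := List.getElem_mem hlen
    have hmem' : ((attrs.items[index]).1, (attrs.items[index]).2) ∈ attrs.items := by
      simpa only [Prod.mk.eta] using hmem
    have hval : attrs.getD (attrs.items[index]).1 [] = (attrs.items[index]).2 :=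
      PySem.Dict.getD_of_mem_items attrs hmem' hnd []
    rw [pvGenCombinations]
    simp only [h, if_false, hkey, hval]
    rw [PySem.List.foldl_append_eq_flatMap]
    have ihs : ∀ v, pvGenCombinations attrs (current.insert (attrs.items[index]).1 v) (index + 1)
        = pvFold (attrs.items.drop (index + 1)) [current.insert (attrs.items[index]).1 v] := by
      intro v
      exact pvGen_eq_fold attrs hnd (current.insert (attrs.items[index]).1 v) (index + 1)
    calc ((attrs.items[index]).2).flatMap
          (fun v => pvGenCombinations attrs (current.insert (attrs.items[index]).1 v) (index + 1))
        = ((attrs.items[index]).2).flatMap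
          (fun v => pvFold (attrs.items.drop (index + 1)) [current.insert (attrs.items[index]).1 v]) := by
          simp only [ihs]
      _ = pvFold (attrs.items.drop (index + 1))
            (((attrs.items[index]).2).flatMap (fun v => [current.insert (attrs.items[index]).1 v])) := by
          rw [pvFold_flatMap]
      _ = pvFold (attrs.items.drop index) [current] := by
          rw [hdrop]
          simp only [pvFold, List.foldl_cons, List.flatMap_cons, List.flatMap_nil,
            List.append_nil, ← List.map_eq_flatMap]
termination_by attrs.keys.length - index
decreasing_by omega

-- ===== VERDICT (by name: the statement is the Claim_ definition above) =====
theorem generate_variant_combinations_dict_spec : Claim_equal_generate_variant_combinations_dict := by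
  intro attributes_values _
  unfold Spec_generate_variant_combinations_dict
  unfold generate_variant_combinations_dict generate_variant_combinations_dict_alt
  rw [pvGen_eq_fold _ (PySem.Dict.nodup_keys_ofList attributes_values) _ 0]
  rfl
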